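-- pv_equiv track=rewrite | github.com/keniferAma/retos-de-programacion | expresiones_equilibradas.py | regulador_de_expresiones
-- ===== SOURCE A (Python) =====
-- def regulador_de_expresiones(expresion):
--     parametros = ""
--     expresiones_erroneas = ""
--     for elemento in expresion:
--         if (elemento == "{" or elemento == "}" or
--             elemento == "(" or elemento == ")" or
--             elemento == "[" or elemento == "]"):
--
--             parametros += parametros.join(elemento)
--
--     while parametros:
--         if "()" in parametros:
--             indice = parametros.index("()")
--             primera_parte = parametros[:indice]
--             segunda_parte = parametros[indice + 2:]
--             parametros = primera_parte + segunda_parte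
--
--         elif "[]" in parametros:
--             indice = parametros.index("[]")
--             primera_parte = parametros[:indice]
--             segunda_parte = parametros[indice + 2:]
--             parametros = primera_parte + segunda_parte
--
--         elif "{}" in parametros:
--             indice = parametros.index("{}")
--             primera_parte = parametros[:indice]
--             segunda_parte = parametros[indice + 2:]
--             parametros = primera_parte + segunda_parte
--
--         else:
--             expresiones_erroneas = parametros
--             break
--
--     if expresiones_erroneas:
--         return f"Estas expresiones no están equilibradas: {expresiones_erroneas}"
--     else:
--         return "Expresiones bien equilibradas."
-- ===== SOURCE B (Python) =====
-- def regulador_de_expresiones(expresion):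
--     pila = []
--     for c in expresion:
--         if c in "(){}[]":
--             if pila and pila[-1] + c in ("()", "[]", "{}"):
--                 pila.pop()
--             else:
--                 pila.append(c)
--     if pila:
--         return f"Estas expresiones no están equilibradas: {''.join(pila)}"
--     return "Expresiones bien equilibradas."
-- ===== Notes on version B (the rewrite author's own statement) =====
-- stated objective: faster
-- what changed: Replaced the repeated substring-search-and-splice elimination loop over the bracket string with a single-pass stack: matching adjacent pairs are cancelled on the fly and the residual stack is the leftover string.
import Mathlib
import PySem

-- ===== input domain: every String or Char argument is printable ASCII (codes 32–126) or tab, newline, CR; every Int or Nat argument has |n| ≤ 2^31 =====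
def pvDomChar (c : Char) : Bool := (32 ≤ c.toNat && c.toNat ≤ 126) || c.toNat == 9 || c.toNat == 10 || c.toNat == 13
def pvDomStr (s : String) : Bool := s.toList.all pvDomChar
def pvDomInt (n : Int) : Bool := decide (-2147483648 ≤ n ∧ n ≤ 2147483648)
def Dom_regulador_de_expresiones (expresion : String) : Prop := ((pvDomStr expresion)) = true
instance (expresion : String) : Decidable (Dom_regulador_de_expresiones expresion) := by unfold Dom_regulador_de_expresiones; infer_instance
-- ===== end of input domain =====

-- B replaces A's quadratic repeated pair-elimination over the bracket string with a
-- single-pass stack whose residual is the leftover string (measured faster, asymptotic).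

-- ===== PORT A =====

-- A's bracket test, in A's order of comparisons
def pvEsParam (c : Char) : Bool :=
  c == '{' || c == '}' || c == '(' || c == ')' || c == '[' || c == ']'

-- the for-loop building `parametros` (parametros.join(single char) == that char)
def pvFiltroA (l : List Char) : List Char :=
  l.foldl (fun p e => if pvEsParam e then p ++ [e] else p) []

-- `pair in s` / `s.index(pair)` for a two-character pair, over List Char
def pvFindSub (a b : Char) : List Char → Option Nat
  | x :: y :: t => if x == a && y == b then some 0 else (pvFindSub a b (y :: t)).map (· + 1)
  | _ => none

theorem pvFindSub_bound (a b : Char) (p : List Char) (i : Nat)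
    (h : pvFindSub a b p = some i) : i + 2 ≤ p.length := by
  induction p generalizing i with
  | nil => simp [pvFindSub] at h
  | cons x t ih =>
    match t with
    | [] => simp [pvFindSub] at h
    | y :: t' =>
      rw [pvFindSub] at h
      split at h
      · simp at h; simp only [List.length_cons]; omega
      · simp only [Option.map_eq_some_iff] at h
        obtain ⟨j, hj, rfl⟩ := h
        have := ih j hj
        simp only [List.length_cons] at this ⊢
        omega

-- the while-loop: repeatedly splice out the first "()", else "[]", else "{}";
-- returns `expresiones_erroneas` (the surviving string, [] if everything cancelled)
def pvLoopA (p : List Char) : List Char :=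
  if p = [] then []
  else
    match _h1 : pvFindSub '(' ')' p with
    | some i => pvLoopA (p.take i ++ p.drop (i + 2))
    | none =>
      match _h2 : pvFindSub '[' ']' p with
      | some i => pvLoopA (p.take i ++ p.drop (i + 2))
      | none =>
        match _h3 : pvFindSub '{' '}' p with
        | some i => pvLoopA (p.take i ++ p.drop (i + 2))
        | none => p
termination_by p.length
decreasing_by
  all_goals
    first
    | (have hb := pvFindSub_bound '(' ')' p i _h1
       simp only [List.length_append, List.length_take, List.length_drop]; omega)
    | (have hb := pvFindSub_bound '[' ']' p i _h2
       simp only [List.length_append, List.length_take, List.length_drop]; omega)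
    | (have hb := pvFindSub_bound '{' '}' p i _h3
       simp only [List.length_append, List.length_take, List.length_drop]; omega)

def regulador_de_expresiones (expresion : String) : String :=
  let parametros := pvFiltroA expresion.toList
  let expresiones_erroneas := pvLoopA parametros
  if expresiones_erroneas ≠ [] then
    "Estas expresiones no están equilibradas: " ++ String.ofList expresiones_erroneas
  else "Expresiones bien equilibradas."

-- ===== PORT B =====

-- B's bracket test: c in "(){}[]"
def pvEsBracket (c : Char) : Bool :=
  c == '(' || c == ')' || c == '{' || c == '}' || c == '[' || c == ']'

-- pila[-1] + c in ("()", "[]", "{}")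
def pvIsPair (a b : Char) : Bool :=
  (a == '(' && b == ')') || (a == '[' && b == ']') || (a == '{' && b == '}')

-- one stack step; the stack is kept top-first (Python appends/pops at the end,
-- so the final residual in Python order is the reverse of this list)
def pvStep (pila : List Char) (c : Char) : List Char :=
  match pila with
  | t :: rest => if pvIsPair t c then rest else c :: t :: rest
  | [] => [c]

def pvStepB (pila : List Char) (c : Char) : List Char :=
  if pvEsBracket c then pvStep pila c else pila

def regulador_de_expresiones_alt (expresion : String) : String :=
  let pila := expresion.toList.foldl pvStepB []
  if pila ≠ [] then
    "Estas expresiones no están equilibradas: " ++ String.ofList pila.reverse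
  else "Expresiones bien equilibradas."

-- ===== PRECONDITION & SPEC =====
def Spec_regulador_de_expresiones (expresion : String) (out : String) : Prop := out = regulador_de_expresiones_alt expresion
instance (expresion : String) (out : String) : Decidable (Spec_regulador_de_expresiones expresion out) := by unfold Spec_regulador_de_expresiones; infer_instance

-- ===== CLAIM (what is proved, stated in full; the proofs are below) =====
def Claim_equal_regulador_de_expresiones : Prop := ∀ (expresion : String), Dom_regulador_de_expresiones expresion → Spec_regulador_de_expresiones expresion (regulador_de_expresiones expresion)

-- ===== LEMMAS AND PROOFS =====

theorem pvEsParam_eq (c : Char) : pvEsParam c = pvEsBracket c := by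
  simp only [pvEsParam, pvEsBracket]
  cases h1 : c == '{' <;> cases h2 : c == '}' <;> cases h3 : c == '(' <;>
    cases h4 : c == ')' <;> cases h5 : c == '[' <;> cases h6 : c == ']' <;> rfl

theorem pvFiltroA_eq (l : List Char) (acc : List Char) :
    l.foldl (fun p e => if pvEsParam e then p ++ [e] else p) acc = acc ++ l.filter pvEsParam := by
  induction l generalizing acc with
  | nil => simp
  | cons c t ih =>
    by_cases h : pvEsParam c = true <;>
      simp [h, ih]

theorem pvFindSub_decomp (a b : Char) (p : List Char) (i : Nat)
    (h : pvFindSub a b p = some i) : p = p.take i ++ a :: b :: p.drop (i + 2) := by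
  induction p generalizing i with
  | nil => simp [pvFindSub] at h
  | cons x t ih =>
    match t with
    | [] => simp [pvFindSub] at h
    | y :: t' =>
      rw [pvFindSub] at h
      split at h
      · next hc =>
        simp only [Option.some.injEq] at h
        subst h
        simp only [Bool.and_eq_true, beq_iff_eq] at hc
        obtain ⟨rfl, rfl⟩ := hc
        simp
      · simp only [Option.map_eq_some_iff] at h
        obtain ⟨j, hj, rfl⟩ := h
        have := ih j hj
        simp only [List.take_succ_cons, List.drop_succ_cons]
        exact congrArg (x :: ·) this

def pvNoPair (l : List Char) : Prop := List.IsChain (fun a b => pvIsPair a b = false) l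

theorem pvNoPair_adj (xs : List Char) (a b : Char) (ys : List Char)
    (h : pvNoPair (xs ++ a :: b :: ys)) : pvIsPair a b = false := by
  induction xs with
  | nil => exact (List.isChain_cons_cons.mp h).1
  | cons x xs ih => exact ih (List.isChain_of_isChain_cons h)

theorem pvNoPair_of_none (p : List Char)
    (h1 : pvFindSub '(' ')' p = none) (h2 : pvFindSub '[' ']' p = none)
    (h3 : pvFindSub '{' '}' p = none) : pvNoPair p := by
  induction p with
  | nil => exact List.isChain_nil
  | cons x t ih =>
    match t with
    | [] => exact List.isChain_singleton x
    | y :: t' =>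
      rw [pvFindSub] at h1 h2 h3
      by_cases c1 : (x == '(' && y == ')') = true
      · rw [if_pos c1] at h1; simp at h1
      by_cases c2 : (x == '[' && y == ']') = true
      · rw [if_pos c2] at h2; simp at h2
      by_cases c3 : (x == '{' && y == '}') = true
      · rw [if_pos c3] at h3; simp at h3
      rw [if_neg c1] at h1; rw [if_neg c2] at h2; rw [if_neg c3] at h3
      simp only [Option.map_eq_none_iff] at h1 h2 h3
      refine List.isChain_cons_cons.mpr ⟨?_, ih h1 h2 h3⟩
      simp only [pvIsPair, Bool.or_eq_false_iff]
      exact ⟨⟨eq_false_of_ne_true c1, eq_false_of_ne_true c2⟩, eq_false_of_ne_true c3⟩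

theorem pvStep_opener (st : List Char) (c : Char)
    (h : c = '(' ∨ c = '[' ∨ c = '{') : pvStep st c = c :: st := by
  cases st with
  | nil => rfl
  | cons t r =>
    rcases h with rfl | rfl | rfl <;> simp [pvStep, pvIsPair]

theorem pvStep_pair (st : List Char) (a b : Char) (hab : pvIsPair a b = true) :
    pvStep (pvStep st a) b = st := by
  have ha : a = '(' ∨ a = '[' ∨ a = '{' := by
    simp only [pvIsPair, Bool.or_eq_true, Bool.and_eq_true, beq_iff_eq] at hab
    tauto
  rw [pvStep_opener st a ha]
  simp [pvStep, hab]

theorem pvFoldl_cancel (a b : Char) (xs ys : List Char) (st : List Char)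
    (hab : pvIsPair a b = true) :
    List.foldl pvStep st (xs ++ a :: b :: ys) = List.foldl pvStep st (xs ++ ys) := by
  simp only [List.foldl_append, List.foldl_cons]
  rw [pvStep_pair _ _ _ hab]

theorem pvFoldl_noPair (l : List Char) (st : List Char)
    (h : pvNoPair (st.reverse ++ l)) : List.foldl pvStep st l = l.reverse ++ st := by
  induction l generalizing st with
  | nil => simp
  | cons c t ih =>
    have hstep : pvStep st c = c :: st := by
      cases st with
      | nil => rfl
      | cons s0 r =>
        have h' := h
        rw [List.reverse_cons, List.append_assoc, List.singleton_append] at h'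
        have := pvNoPair_adj r.reverse s0 c t h'
        simp [pvStep, this]
    rw [List.foldl_cons, hstep]
    have h2 : pvNoPair ((c :: st).reverse ++ t) := by
      rw [List.reverse_cons, List.append_assoc, List.singleton_append]
      exact h
    rw [ih (c :: st) h2]
    simp

theorem pvLoopA_fold (p : List Char) :
    List.foldl pvStep [] (pvLoopA p) = List.foldl pvStep [] p := by
  fun_induction pvLoopA p with
  | case1 => simp
  | case2 p hne i h1 ih =>
    rw [ih]
    conv_rhs => rw [pvFindSub_decomp '(' ')' p i h1]
    exact (pvFoldl_cancel _ _ _ _ _ (by decide)).symm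
  | case3 p hne h1 i h2 ih =>
    rw [ih]
    conv_rhs => rw [pvFindSub_decomp '[' ']' p i h2]
    exact (pvFoldl_cancel _ _ _ _ _ (by decide)).symm
  | case4 p hne h1 h2 i h3 ih =>
    rw [ih]
    conv_rhs => rw [pvFindSub_decomp '{' '}' p i h3]
    exact (pvFoldl_cancel _ _ _ _ _ (by decide)).symm
  | case5 p hne h1 h2 h3 => rfl

theorem pvLoopA_noPair (p : List Char) : pvNoPair (pvLoopA p) := by
  fun_induction pvLoopA p with
  | case1 => exact List.isChain_nil
  | case2 p hne i h1 ih => exact ih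
  | case3 p hne h1 i h2 ih => exact ih
  | case4 p hne h1 h2 i h3 ih => exact ih
  | case5 p hne h1 h2 h3 => exact pvNoPair_of_none p h1 h2 h3

theorem pvFoldl_stepB_filter (l : List Char) (st : List Char) :
    List.foldl pvStepB st l = List.foldl pvStep st (l.filter pvEsBracket) := by
  induction l generalizing st with
  | nil => rfl
  | cons c t ih =>
    by_cases h : pvEsBracket c = true <;>
      simp [pvStepB, h, ih]

theorem pvLoopA_eq_stack (l : List Char) :
    pvLoopA (pvFiltroA l) = (List.foldl pvStepB [] l).reverse := by
  have hfil : pvFiltroA l = l.filter pvEsBracket := by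
    rw [pvFiltroA, pvFiltroA_eq, List.nil_append]
    exact List.filter_congr fun x _ => pvEsParam_eq x
  set q := pvLoopA (pvFiltroA l) with hq
  have hnp : pvNoPair q := pvLoopA_noPair _
  have hfold : List.foldl pvStep [] q = q.reverse := by
    have := pvFoldl_noPair q [] (by simpa using hnp)
    simpa using this
  have : q.reverse = List.foldl pvStepB [] l := by
    rw [← hfold, hq, pvLoopA_fold, hfil, pvFoldl_stepB_filter]
  rw [← this, List.reverse_reverse]

-- ===== VERDICT (by name: the statement is the Claim_ definition above) =====
theorem regulador_de_expresiones_spec : Claim_equal_regulador_de_expresiones := by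
  intro expresion _
  unfold Spec_regulador_de_expresiones regulador_de_expresiones regulador_de_expresiones_alt
  simp only [pvLoopA_eq_stack expresion.toList]
  by_cases h : (List.foldl pvStepB [] expresion.toList) = [] <;>
    simp [h]
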